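-- pv_equiv track=rewrite | github.com/btaille/tagger | load_conll.py | correct_nes
-- ===== SOURCE A (Python) =====
-- def correct_nes(nes):
--     corrected_nes = []
--     for tags in nes:
--         corrected_tags = []
--         previous_prefix = "O"
--         previous_suffix = "O"
--         for i, t in enumerate(tags):
--             if len(t.split("-")) == 2:
--                 prefix, suffix = t.split("-")
--             else:
--                 prefix, suffix = ("O", "O")
--
--             if previous_prefix == "O" and prefix == "I":
--                 corrected_tag = "B-" + suffix
--             elif previous_prefix in ["I", "B"] and prefix == "I" and not previous_suffix == suffix:
--                 corrected_tag = "B-" + suffix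
--             else:
--                 corrected_tag = t
--
--             corrected_tags.append(corrected_tag)
--             previous_prefix = prefix
--             previous_suffix = suffix
--
--         corrected_nes.append(corrected_tags)
--     return corrected_nes
-- ===== SOURCE B (Python) =====
-- def correct_nes(nes):
--     def parse(t):
--         parts = t.split("-")
--         return (parts[0], parts[1]) if len(parts) == 2 else ("O", "O")
--
--     def decide(prev, t):
--         cp, cs = parse(t)
--         pp, ps = prev
--         if cp == "I" and (pp == "O" or (pp in ("I", "B") and ps != cs)):
--             return "B-" + cs
--         return t
--
--     def conquer(tags):
--         # divide and conquer: each output tag depends only on (tags[i-1], tags[i]),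
--         # so correct both halves independently and re-decide the junction element.
--         n = len(tags)
--         if n == 0:
--             return []
--         if n == 1:
--             return [decide(("O", "O"), tags[0])]
--         mid = n // 2
--         left, right = tags[:mid], tags[mid:]
--         return conquer(left) + [decide(parse(left[-1]), right[0])] + conquer(right)[1:]
--
--     return [conquer(tags) for tags in nes]
-- ===== Notes on version B (the rewrite author's own statement) =====
-- stated objective: alternative
-- what changed: Replaces A's single stateful left-to-right pass with a divide-and-conquer algorithm: each sequence is split in half, both halves corrected recursively, and only the junction element is re-decided against the real predecessor (correct because each output tag depends only on the adjacent tag pair).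
import Mathlib
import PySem

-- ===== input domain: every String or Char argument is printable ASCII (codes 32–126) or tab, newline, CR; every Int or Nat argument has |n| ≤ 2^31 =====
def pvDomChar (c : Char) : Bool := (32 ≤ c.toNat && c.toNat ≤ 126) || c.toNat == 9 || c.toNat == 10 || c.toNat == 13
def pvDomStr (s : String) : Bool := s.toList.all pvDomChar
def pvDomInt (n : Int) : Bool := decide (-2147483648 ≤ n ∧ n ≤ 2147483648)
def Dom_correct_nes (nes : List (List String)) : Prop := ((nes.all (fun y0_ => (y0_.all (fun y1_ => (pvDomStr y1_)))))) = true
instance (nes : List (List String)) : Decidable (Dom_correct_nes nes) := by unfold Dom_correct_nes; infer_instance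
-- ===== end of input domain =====

-- B replaces A's single stateful pass with divide-and-conquer on each sequence, re-deciding only the junction element (objective: alternative algorithm).


-- ===== PORT A =====
-- t.split("-"); if it has exactly two parts take them, else ("O","O")
def pvParseA (t : String) : String × String :=
  match (PySem.Str.split? t "-").getD [] with
  | [a, b] => (a, b)
  | _ => ("O", "O")

-- one step of A's inner loop: state is (corrected_tags, previous_prefix, previous_suffix)
def pvStepA (st : List String × String × String) (t : String) : List String × String × String :=
  let (acc, pp, ps) := st
  let (pre, suf) := pvParseA t
  let ct :=
    if pp == "O" && pre == "I" then "B-" ++ suf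
    else if (pp == "I" || pp == "B") && pre == "I" && !(ps == suf) then "B-" ++ suf
    else t
  (acc ++ [ct], pre, suf)

def correct_nes (nes : List (List String)) : List (List String) :=
  nes.foldl (fun acc tags => acc ++ [(tags.foldl pvStepA ([], "O", "O")).1]) []

-- ===== PORT B =====
def pvParseB (t : String) : String × String :=
  match (PySem.Str.split? t "-").getD [] with
  | [a, b] => (a, b)
  | _ => ("O", "O")

def pvDecide (prev : String × String) (t : String) : String :=
  let (cp, cs) := pvParseB t
  let (pp, ps) := prev
  if cp == "I" && (pp == "O" || ((pp == "I" || pp == "B") && ps != cs)) then "B-" ++ cs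
  else t

-- divide and conquer: correct both halves, then re-decide the junction element
def pvConquer (tags : List String) : List String :=
  match tags with
  | [] => []
  | [t] => [pvDecide ("O", "O") t]
  | t1 :: t2 :: rest =>
    let mid := (t1 :: t2 :: rest).length / 2
    pvConquer ((t1 :: t2 :: rest).take mid) ++
      pvDecide (pvParseB (((t1 :: t2 :: rest).take mid).getLastD "")) (((t1 :: t2 :: rest).drop mid).headD "") ::
      (pvConquer ((t1 :: t2 :: rest).drop mid)).tail
termination_by tags.length
decreasing_by
  · simp; omega
  · simp; omega

def correct_nes_alt (nes : List (List String)) : List (List String) :=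
  nes.map pvConquer

-- ===== PRECONDITION & SPEC =====
def Spec_correct_nes (nes : List (List String)) (out : List (List String)) : Prop := out = correct_nes_alt nes
instance (nes : List (List String)) (out : List (List String)) : Decidable (Spec_correct_nes nes out) := by unfold Spec_correct_nes; infer_instance

-- ===== CLAIM (what is proved, stated in full; the proofs are below) =====
def Claim_equal_correct_nes : Prop := ∀ (nes : List (List String)), Dom_correct_nes nes → Spec_correct_nes nes (correct_nes nes)

-- ===== LEMMAS AND PROOFS =====

-- reference recursion: A's stateful pass written structurally
def pvGo (prev : String × String) : List String → List String
  | [] => []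
  | t :: ts => pvDecide prev t :: pvGo (pvParseB t) ts

-- A's element-wise branch equals B's pvDecide
theorem stepA_eq (acc : List String) (pp ps t : String) :
    pvStepA (acc, pp, ps) t = (acc ++ [pvDecide (pp, ps) t], pvParseB t) := by
  rcases hpt : pvParseB t with ⟨cp, cs⟩
  have hA : pvParseA t = (cp, cs) := hpt
  simp only [pvStepA, pvDecide, hA, hpt]
  cases hcp : cp == "I" <;> cases hpp : pp == "O" <;>
    cases hpi : pp == "I" <;> cases hpb : pp == "B" <;> cases hps : ps == cs <;>
    simp [hps, bne]

-- A's inner fold equals the reference recursion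
theorem foldA_eq (tags : List String) : ∀ (pp ps : String) (acc : List String),
    (tags.foldl pvStepA (acc, pp, ps)).1 = acc ++ pvGo (pp, ps) tags := by
  induction tags with
  | nil => intro pp ps acc; simp [pvGo]
  | cons t ts ih =>
      intro pp ps acc
      simp only [List.foldl_cons, stepA_eq]
      rcases hpt : pvParseB t with ⟨cp, cs⟩
      rw [ih cp cs]
      simp [pvGo, hpt]

-- the state after a prefix: parse of its last element, else the incoming state
def pvLastP (prev : String × String) (l : List String) : String × String :=
  match l.getLast? with
  | some t => pvParseB t
  | none => prev

theorem pvGo_append (l : List String) : ∀ (prev : String × String) (r : List String),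
    pvGo prev (l ++ r) = pvGo prev l ++ pvGo (pvLastP prev l) r := by
  induction l with
  | nil => intro prev r; simp [pvGo, pvLastP]
  | cons t ts ih =>
      intro prev r
      simp only [List.cons_append, pvGo, ih]
      congr 2
      simp [pvLastP, List.getLast?_cons]
      cases h : ts.getLast? <;> simp

-- the divide-and-conquer algorithm computes the reference recursion from the neutral state
theorem conquer_eq (tags : List String) : pvConquer tags = pvGo ("O", "O") tags := by
  induction tags using pvConquer.induct with
  | case1 => simp [pvConquer, pvGo]
  | case2 t => simp [pvConquer, pvGo]
  | case3 t1 t2 rest mid ihl ihr =>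
      rw [pvConquer]
      have hmid1 : 1 ≤ mid := by simp [mid]; omega
      have hmidn : mid < (t1 :: t2 :: rest).length := by simp [mid]; omega
      have hsplit : (t1 :: t2 :: rest) = (t1 :: t2 :: rest).take mid ++ (t1 :: t2 :: rest).drop mid := by
        simp
      set L := (t1 :: t2 :: rest).take mid with hL
      set R := (t1 :: t2 :: rest).drop mid with hR
      have hLlen : L.length = mid := by rw [hL]; exact List.length_take_of_le (le_of_lt hmidn)
      have hRlen : R.length = (t1 :: t2 :: rest).length - mid := by rw [hR, List.length_drop]
      have hLne : L ≠ [] := List.ne_nil_of_length_pos (by rw [hLlen]; exact hmid1)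
      have hRne : R ≠ [] := List.ne_nil_of_length_pos (by rw [hRlen]; exact Nat.sub_pos_of_lt hmidn)
      obtain ⟨rh, rt, hrr⟩ := List.exists_cons_of_ne_nil hRne
      conv_rhs => rw [hsplit]
      rw [pvGo_append, ihl, ihr, hrr]
      have hx : ∃ x, L.getLast? = some x := by
        cases h : L.getLast? with
        | none => exact absurd (List.getLast?_eq_none_iff.mp h) hLne
        | some x => exact ⟨x, rfl⟩
      obtain ⟨x, hx⟩ := hx
      have hlast : pvLastP ("O", "O") L = pvParseB (L.getLastD "") := by
        simp [pvLastP, hx, List.getLastD_eq_getLast?]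
      simp [pvGo, hlast]

theorem outer_eq (nes : List (List String)) : ∀ (acc : List (List String)),
    nes.foldl (fun acc tags => acc ++ [(tags.foldl pvStepA ([], "O", "O")).1]) acc
      = acc ++ nes.map pvConquer := by
  induction nes with
  | nil => intro acc; simp
  | cons tags rest ih =>
      intro acc
      simp only [List.foldl_cons, List.map_cons, ih]
      rw [foldA_eq tags "O" "O" [], conquer_eq]
      simp

-- ===== VERDICT (by name: the statement is the Claim_ definition above) =====
theorem correct_nes_spec : Claim_equal_correct_nes := by
  intro nes _
  unfold Spec_correct_nes correct_nes correct_nes_alt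
  simpa using outer_eq nes []
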